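-- pv_equiv track=rewrite | github.com/openeuler-mirror/gala-anteater | tests/e2e_tests/test_local_file.py | check_consecutive_deviation
-- ===== SOURCE A (Python) =====
-- def check_consecutive_deviation(deviation_status_list, consecutive_count=5):
--     """
--     检查连续偏离点是否超过指定数量。
--
--     参数:
--     deviation_status_list (list): 偏离状态列表。
--     consecutive_count (int): 连续偏离点的阈值，默认为 5。
--
--     返回:
--     list: 标记为故障点的布尔列表。
--     """
--     corrected_status = []
--     consecutive_count_current = 0
--     for status in deviation_status_list:
--         if status:
--             consecutive_count_current += 1
--         else:
--             consecutive_count_current = 0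
--         if consecutive_count_current >= consecutive_count:
--             corrected_status.append(True)
--         else:
--             corrected_status.append(False)
--     return corrected_status
-- ===== SOURCE B (Python) =====
-- def check_consecutive_deviation(deviation_status_list, consecutive_count=5):
--     """Sliding-window re-implementation: position i is flagged iff the window
--     of the last `consecutive_count` statuses ending at i exists and is all truthy
--     (for consecutive_count <= 0 every position is flagged)."""
--     n = len(deviation_status_list)
--     if consecutive_count <= 0:
--         return [True] * n
--     return [
--         i + 1 >= consecutive_count
--         and all(deviation_status_list[i + 1 - consecutive_count : i + 1])
--         for i in range(n)
--     ]
-- ===== Notes on version B (the rewrite author's own statement) =====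
-- stated objective: alternative
-- what changed: Replaced the running-counter scan with an index-based sliding-window formulation: position i is flagged iff the window of the last consecutive_count statuses ending at i exists and is all truthy (with all positions flagged when consecutive_count <= 0).
import Mathlib
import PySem

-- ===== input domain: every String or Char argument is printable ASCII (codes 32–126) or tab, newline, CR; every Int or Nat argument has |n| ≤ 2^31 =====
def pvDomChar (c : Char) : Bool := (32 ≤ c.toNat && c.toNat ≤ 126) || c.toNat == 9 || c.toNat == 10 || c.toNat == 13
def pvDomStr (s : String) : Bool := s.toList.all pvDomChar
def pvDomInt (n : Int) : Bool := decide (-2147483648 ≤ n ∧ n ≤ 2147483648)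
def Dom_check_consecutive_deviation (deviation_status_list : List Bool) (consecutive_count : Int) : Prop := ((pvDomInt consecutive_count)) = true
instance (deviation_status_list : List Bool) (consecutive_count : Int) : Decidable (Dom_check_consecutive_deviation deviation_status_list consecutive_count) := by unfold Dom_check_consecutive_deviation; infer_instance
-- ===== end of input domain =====

-- B replaces A's running counter with a sliding-window check per index (alternative decomposition, same results).

-- ===== PORT A =====
-- literal port of A: fold carrying (corrected_status, consecutive_count_current)
def check_consecutive_deviation (deviation_status_list : List Bool) (consecutive_count : Int) : List Bool :=
  (deviation_status_list.foldl
    (fun (acc : List Bool × Int) (status : Bool) =>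
      let c : Int := if status then acc.2 + 1 else 0
      (acc.1 ++ [decide (c ≥ consecutive_count)], c))
    ([], 0)).1

-- ===== PORT B =====
-- literal port of B: [True]*n early return, else comprehension over range(n) with a slice window
def check_consecutive_deviation_alt (deviation_status_list : List Bool) (consecutive_count : Int) : List Bool :=
  if consecutive_count ≤ 0 then List.replicate deviation_status_list.length true
  else (List.range deviation_status_list.length).map (fun (i : Nat) =>
    decide ((i : Int) + 1 ≥ consecutive_count) &&
      (PySem.List.slice deviation_status_list (some ((i : Int) + 1 - consecutive_count)) (some ((i : Int) + 1))).all (fun b => b))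

-- ===== PRECONDITION & SPEC =====
def Spec_check_consecutive_deviation (deviation_status_list : List Bool) (consecutive_count : Int) (out : List Bool) : Prop := out = check_consecutive_deviation_alt deviation_status_list consecutive_count
instance (deviation_status_list : List Bool) (consecutive_count : Int) (out : List Bool) : Decidable (Spec_check_consecutive_deviation deviation_status_list consecutive_count out) := by unfold Spec_check_consecutive_deviation; infer_instance

-- ===== CLAIM (what is proved, stated in full; the proofs are below) =====
def Claim_equal_check_consecutive_deviation : Prop := ∀ (deviation_status_list : List Bool) (consecutive_count : Int), Dom_check_consecutive_deviation deviation_status_list consecutive_count → Spec_check_consecutive_deviation deviation_status_list consecutive_count (check_consecutive_deviation deviation_status_list consecutive_count)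

-- ===== LEMMAS AND PROOFS =====

-- the running counter of A over a prefix
def pvCnt (xs : List Bool) : Int := xs.foldl (fun c s => if s then c + 1 else 0) 0

theorem pvCnt_snoc (xs : List Bool) (s : Bool) :
    pvCnt (xs ++ [s]) = if s then pvCnt xs + 1 else 0 := by
  simp [pvCnt, List.foldl_append]

theorem pvCnt_nonneg (xs : List Bool) : 0 ≤ pvCnt xs := by
  induction xs using List.reverseRecOn with
  | nil => simp [pvCnt]
  | append_singleton xs s ih =>
      rw [pvCnt_snoc]
      split <;> omega

theorem pvFold_snd (cc : Int) (ys : List Bool) (acc : List Bool) (c : Int) :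
    ((ys.foldl
      (fun (a : List Bool × Int) (status : Bool) =>
        let c' : Int := if status then a.2 + 1 else 0
        (a.1 ++ [decide (c' ≥ cc)], c'))
      (acc, c)).2)
    = ys.foldl (fun c s => if s then c + 1 else 0) c := by
  induction ys generalizing acc c with
  | nil => rfl
  | cons y ys ih => simp [List.foldl, ih]

theorem A_snoc (xs : List Bool) (s : Bool) (cc : Int) :
    check_consecutive_deviation (xs ++ [s]) cc
      = check_consecutive_deviation xs cc ++ [decide (pvCnt (xs ++ [s]) ≥ cc)] := by
  unfold check_consecutive_deviation
  rw [List.foldl_append]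
  have h2 := pvFold_snd cc xs [] 0
  rw [pvCnt_snoc]
  simp [List.foldl, h2, pvCnt]

theorem A_le_zero (xs : List Bool) (cc : Int) (h : cc ≤ 0) :
    check_consecutive_deviation xs cc = List.replicate xs.length true := by
  induction xs using List.reverseRecOn with
  | nil => rfl
  | append_singleton xs s ih =>
      rw [A_snoc, ih]
      have hc : pvCnt (xs ++ [s]) ≥ cc := by
        rw [pvCnt_snoc]
        have := pvCnt_nonneg xs
        split <;> omega
      simp [hc, List.replicate_succ']

-- the counter reaches cc exactly when the last cc positions exist and are all true
theorem cnt_window (ys : List Bool) (cc : Int) (h : 1 ≤ cc) :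
    decide (pvCnt ys ≥ cc)
      = (decide (cc ≤ (ys.length : Int)) && (ys.drop (ys.length - cc.toNat)).all (fun b => b)) := by
  induction ys using List.reverseRecOn generalizing cc with
  | nil =>
      have hl : decide (pvCnt [] ≥ cc) = false := by simp [pvCnt]; omega
      have hr : decide (cc ≤ (([] : List Bool).length : Int)) = false := by simp; omega
      rw [hl, hr, Bool.false_and]
  | append_singleton xs s ih =>
      rw [pvCnt_snoc]
      cases s with
      | false =>
          have hl : decide ((if (false : Bool) = true then pvCnt xs + 1 else 0) ≥ cc) = false := by
            simp; omega
          rw [hl]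
          by_cases hcc : cc ≤ (xs.length : Int) + 1
          · have hm : (xs ++ [false]).length - cc.toNat ≤ xs.length := by
              simp only [List.length_append, List.length_cons, List.length_nil]; omega
            rw [List.drop_append_of_le_length hm, List.all_append]
            simp
          · have h2 : decide (cc ≤ (((xs ++ [false]).length : Nat) : Int)) = false := by
              simp only [List.length_append, List.length_cons, List.length_nil]
              rw [decide_eq_false_iff_not]
              push_cast; omega
            rw [h2, Bool.false_and]
      | true =>
          rw [if_pos rfl]
          have hm : (xs ++ [true]).length - cc.toNat ≤ xs.length := by
            simp only [List.length_append, List.length_cons, List.length_nil]; omega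
          rw [List.drop_append_of_le_length hm, List.all_append]
          have hidx : (xs ++ [true]).length - cc.toNat = xs.length - (cc - 1).toNat := by
            simp only [List.length_append, List.length_cons, List.length_nil]; omega
          rw [hidx]
          by_cases h1 : cc = 1
          · subst h1
            have hl : decide (pvCnt xs + 1 ≥ (1 : Int)) = true := by
              rw [decide_eq_true_iff]
              have := pvCnt_nonneg xs; omega
            have hr : decide ((1 : Int) ≤ (((xs ++ [true]).length : Nat) : Int)) = true := by
              rw [decide_eq_true_iff]
              simp only [List.length_append, List.length_cons, List.length_nil]
              push_cast; omega
            rw [hl, hr, Bool.true_and]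
            have hd : xs.length - ((1 : Int) - 1).toNat = xs.length := by omega
            rw [hd]
            simp [List.drop_length]
          · have hL : decide (pvCnt xs + 1 ≥ cc) = decide (pvCnt xs ≥ cc - 1) := by
              rw [decide_eq_decide]; omega
            rw [hL, ih (cc - 1) (by omega)]
            have hlen : decide (cc - 1 ≤ (xs.length : Int)) = decide (cc ≤ (((xs ++ [true]).length : Nat) : Int)) := by
              rw [decide_eq_decide]
              simp only [List.length_append, List.length_cons, List.length_nil]
              push_cast; omega
            rw [hlen]
            simp

theorem B_snoc (xs : List Bool) (s : Bool) (cc : Int) (h : 1 ≤ cc) :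
    check_consecutive_deviation_alt (xs ++ [s]) cc
      = check_consecutive_deviation_alt xs cc
        ++ [decide (cc ≤ ((xs ++ [s]).length : Int)) &&
              ((xs ++ [s]).drop ((xs ++ [s]).length - cc.toNat)).all (fun b => b)] := by
  unfold check_consecutive_deviation_alt
  rw [if_neg (by omega), if_neg (by omega)]
  have hlen : (xs ++ [s]).length = xs.length + 1 := by
    simp only [List.length_append, List.length_cons, List.length_nil]
  rw [hlen, List.range_succ, List.map_append]
  congr 1
  -- earlier windows do not see the appended element
  · apply List.map_congr_left
    intro i hi
    have hi' : i < xs.length := List.mem_range.mp hi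
    by_cases hcc : cc ≤ (i : Int) + 1
    · have ha : (0 : Int) ≤ (i : Int) + 1 - cc := by omega
      have hb : (0 : Int) ≤ (i : Int) + 1 := by omega
      have hal1 : (i : Int) + 1 - cc ≤ ((xs ++ [s]).length : Int) := by
        rw [hlen]; push_cast; omega
      have hbl1 : ((i : Int) + 1) ≤ ((xs ++ [s]).length : Int) := by
        rw [hlen]; push_cast; omega
      have hal2 : (i : Int) + 1 - cc ≤ (xs.length : Int) := by omega
      have hbl2 : ((i : Int) + 1) ≤ (xs.length : Int) := by omega
      rw [PySem.List.slice_of_nonneg _ ha hb hal1 hbl1,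
          PySem.List.slice_of_nonneg _ ha hb hal2 hbl2]
      have hna : ((i : Int) + 1 - cc).toNat ≤ xs.length := by omega
      rw [List.drop_append_of_le_length hna]
      have hk : (((i : Int) + 1).toNat - ((i : Int) + 1 - cc).toNat) ≤ (xs.drop ((i : Int) + 1 - cc).toNat).length := by
        simp only [List.length_drop]; omega
      rw [List.take_append_of_le_length hk]
    · have hfalse : decide ((i : Int) + 1 ≥ cc) = false := by
        rw [decide_eq_false_iff_not]; omega
      rw [hfalse, Bool.false_and, Bool.false_and]
  -- the new last window
  · rw [List.map_singleton]
    by_cases hcc : cc ≤ (xs.length : Int) + 1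
    · have ha : (0 : Int) ≤ ((xs.length : Nat) : Int) + 1 - cc := by omega
      have hb : (0 : Int) ≤ ((xs.length : Nat) : Int) + 1 := by omega
      have hal : ((xs.length : Nat) : Int) + 1 - cc ≤ ((xs ++ [s]).length : Int) := by
        rw [hlen]; push_cast; omega
      have hbl : ((xs.length : Nat) : Int) + 1 ≤ ((xs ++ [s]).length : Int) := by
        rw [hlen]; push_cast; omega
      rw [PySem.List.slice_of_nonneg _ ha hb hal hbl]
      have htake : ((xs ++ [s]).drop (((xs.length : Nat) : Int) + 1 - cc).toNat).length
          ≤ ((((xs.length : Nat) : Int) + 1).toNat - (((xs.length : Nat) : Int) + 1 - cc).toNat) := by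
        simp only [List.length_drop, hlen]; omega
      rw [List.take_of_length_le htake]
      have hge : decide (((xs.length : Nat) : Int) + 1 ≥ cc) = true := by
        rw [decide_eq_true_iff]; omega
      have hle : decide (cc ≤ (((xs.length + 1 : Nat)) : Int)) = true := by
        rw [decide_eq_true_iff]; push_cast; omega
      have hidx : (((xs.length : Nat) : Int) + 1 - cc).toNat = xs.length + 1 - cc.toNat := by
        omega
      simp only [hge, hle, hidx, Bool.true_and]
    · have h1 : decide (((xs.length : Nat) : Int) + 1 ≥ cc) = false := by
        rw [decide_eq_false_iff_not]; omega
      have h2 : decide (cc ≤ (((xs.length + 1 : Nat)) : Int)) = false := by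
        rw [decide_eq_false_iff_not]; push_cast; omega
      simp only [h1, h2, Bool.false_and]

theorem main_pos (cc : Int) (h1 : 1 ≤ cc) (xs : List Bool) :
    check_consecutive_deviation xs cc = check_consecutive_deviation_alt xs cc := by
  induction xs using List.reverseRecOn with
  | nil =>
      simp [check_consecutive_deviation, check_consecutive_deviation_alt,
        show ¬ cc ≤ 0 by omega]
  | append_singleton xs s ih =>
      rw [A_snoc, B_snoc xs s cc h1, ih]
      rw [cnt_window (xs ++ [s]) cc h1]

-- ===== VERDICT (by name: the statement is the Claim_ definition above) =====
theorem check_consecutive_deviation_spec : Claim_equal_check_consecutive_deviation := by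
  intro xs cc _dom
  unfold Spec_check_consecutive_deviation
  by_cases h : cc ≤ 0
  · rw [A_le_zero xs cc h]
    unfold check_consecutive_deviation_alt
    rw [if_pos h]
  · exact main_pos cc (by omega) xs
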